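-- pv_equiv track=rewrite | github.com/euphwes/advent-of-code | 2024/day_12.py | _build_segment
-- ===== SOURCE A (Python) =====
-- def _is_adjacent(p1, p2):
--     dx = abs(p1[0]-p2[0])
--     dy = abs(p1[1]-p2[1])
--     return dx + dy == 1
--
-- def _matches(ptest, segtest):
--     if not any(_is_adjacent(ptest, pseg) for pseg in segtest):
--         return False
--     # it's adjacent to at least 1 in the segment
--     # now check if it's inline with all in the segment
--     if {ptest[0]} == {x for x,_,_ in segtest} and {ptest[2]} == {d for _,_,d in segtest}:
--         return True
--     if {ptest[1]} == {y for _,y,_ in segtest} and {ptest[2]} == {d for _,_,d in segtest}: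
--         return True
--     return False
--
-- def _build_segment(group):
--
--     # pick any arbitrary point
--     segment = [group.pop()]
--
--     while True:
--         found_another = False
--
--         for point in group:
--             if _matches(point, segment):
--                 segment.append(point)
--                 found_another = True
--                 break
--
--         if found_another:
--             group = [g for g in group if g not in segment]
--         else:
--             break
--
--     return segment, group
-- ===== SOURCE B (Python) =====
-- # Faster: grow the line from its two endpoints, testing each round only the two
-- # (initially four) points that could extend it, instead of matching every
-- # remaining point against the whole segment. Pops the last element of the
-- # caller's list, like the original.
-- def _build_segment(group):
--     seed = group.pop()
--     x0, y0, d0 = seed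
--     segment = [seed]
--     rest = group
--     axis = None  # 0 = horizontal (x varies), 1 = vertical (y varies)
--     lo = hi = x0
--     while True:
--         if axis is None:
--             cands = ((x0 - 1, y0, d0), (x0 + 1, y0, d0),
--                      (x0, y0 - 1, d0), (x0, y0 + 1, d0))
--         elif axis == 0:
--             cands = ((lo - 1, y0, d0), (hi + 1, y0, d0))
--         else:
--             cands = ((x0, lo - 1, d0), (x0, hi + 1, d0))
--         pick = next((p for p in rest if p in cands), None)
--         if pick is None:
--             return segment, rest
--         segment.append(pick)
--         if axis is None:
--             axis = 0 if pick[0] != x0 else 1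
--             lo = hi = x0 if axis == 0 else y0
--         v = pick[0] if axis == 0 else pick[1]
--         lo = min(lo, v)
--         hi = max(hi, v)
--         rest = [g for g in rest if g != pick]
-- ===== Notes on version B (the rewrite author's own statement) =====
-- stated objective: faster
-- what changed: Instead of re-testing every remaining point against the whole segment with adjacency plus set-based collinearity scans each round and then re-filtering the group by segment membership, B tracks the line's axis and its two endpoint coordinates and each round looks only for the two (initially four) possible extension points; …
import Mathlib
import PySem

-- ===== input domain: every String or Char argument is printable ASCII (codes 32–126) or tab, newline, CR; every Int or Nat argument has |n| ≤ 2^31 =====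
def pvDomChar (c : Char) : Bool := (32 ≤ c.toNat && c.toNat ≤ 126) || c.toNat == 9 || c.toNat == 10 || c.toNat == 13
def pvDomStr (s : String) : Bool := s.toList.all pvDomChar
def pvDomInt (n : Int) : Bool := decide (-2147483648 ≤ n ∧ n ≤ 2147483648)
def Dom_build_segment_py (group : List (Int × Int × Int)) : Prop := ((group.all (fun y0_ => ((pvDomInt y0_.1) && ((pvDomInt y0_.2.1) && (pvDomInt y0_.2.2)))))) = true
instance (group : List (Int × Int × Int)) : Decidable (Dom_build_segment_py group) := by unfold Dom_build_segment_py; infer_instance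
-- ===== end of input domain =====

-- B grows the line from its two maintained endpoints, each round looking only for the
-- two (initially four) possible extension points, instead of A's per-round adjacency +
-- set-collinearity test of every remaining point against the whole segment.
-- Like A, the Python B pops the last element off the caller's list (same observable
-- mutation); the equivalence proved here is about the return value.


-- ===== PORT A =====
def pvIsAdj (p q : Int × Int × Int) : Bool :=
  decide (|p.1 - q.1| + |p.2.1 - q.2.1| = 1)

def pvMatches (p : Int × Int × Int) (seg : List (Int × Int × Int)) : Bool :=
  if !(seg.any (fun q => pvIsAdj p q)) then false
  else if PySem.Set.equal (PySem.Set.ofList [p.1]) (PySem.Set.ofList (seg.map (fun q => q.1)))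
        && PySem.Set.equal (PySem.Set.ofList [p.2.2]) (PySem.Set.ofList (seg.map (fun q => q.2.2))) then true
  else if PySem.Set.equal (PySem.Set.ofList [p.2.1]) (PySem.Set.ofList (seg.map (fun q => q.2.1)))
        && PySem.Set.equal (PySem.Set.ofList [p.2.2]) (PySem.Set.ofList (seg.map (fun q => q.2.2))) then true
  else false

def pvLoopA (segment group : List (Int × Int × Int)) : (List (Int × Int × Int)) × (List (Int × Int × Int)) :=
  match h : group.find? (fun point => pvMatches point segment) with
  | none => (segment, group)
  | some point =>
      pvLoopA (segment ++ [point]) (group.filter (fun g => !decide (g ∈ segment ++ [point])))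
termination_by group.length
decreasing_by
  have hlt : (List.filter (fun (x : {x // x ∈ group}) => !decide (↑x ∈ segment ++ [point]))
      group.attach).length < group.attach.length :=
    List.length_filter_lt_length_iff_exists.mpr
      ⟨⟨point, List.mem_of_find?_eq_some h⟩, List.mem_attach _ _, by simp⟩
  simpa using hlt

def build_segment_py (group : List (Int × Int × Int)) : (List (Int × Int × Int)) × (List (Int × Int × Int)) :=
  match PySem.List.pop? group (-1) with
  | none => ([], [])  -- group.pop() raises IndexError on []: excluded by Pre_
  | some (seed, rest) => pvLoopA [seed] rest

-- ===== PORT B =====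
def pvCands (x0 y0 d0 : Int) (axis : Option Bool) (lo hi : Int) : List (Int × Int × Int) :=
  match axis with
  | none => [(x0 - 1, y0, d0), (x0 + 1, y0, d0), (x0, y0 - 1, d0), (x0, y0 + 1, d0)]
  | some false => [(lo - 1, y0, d0), (hi + 1, y0, d0)]
  | some true => [(x0, lo - 1, d0), (x0, hi + 1, d0)]

-- axis = 0 if pick[0] != x0 else 1  (false = horizontal, true = vertical)
def pvAxisOf (x0 : Int) (axis : Option Bool) (pick : Int × Int × Int) : Bool :=
  match axis with
  | none => decide (pick.1 = x0)
  | some a => a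

-- base endpoint value: the seed coordinate when the axis has just been fixed, else the running endpoint
def pvBase (axis : Option Bool) (x0 y0 cur : Int) (a : Bool) : Int :=
  match axis with
  | none => if a then y0 else x0
  | some _ => cur

def pvLoopB (x0 y0 d0 : Int) (axis : Option Bool) (lo hi : Int)
    (segment rest : List (Int × Int × Int)) : (List (Int × Int × Int)) × (List (Int × Int × Int)) :=
  match h : rest.find? (fun p => decide (p ∈ pvCands x0 y0 d0 axis lo hi)) with
  | none => (segment, rest)
  | some pick =>
      -- if axis was None: lo = hi = (x0 if new axis == 0 else y0); then lo/hi absorb v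
      pvLoopB x0 y0 d0 (some (pvAxisOf x0 axis pick))
        (min (pvBase axis x0 y0 lo (pvAxisOf x0 axis pick))
             (if pvAxisOf x0 axis pick then pick.2.1 else pick.1))
        (max (pvBase axis x0 y0 hi (pvAxisOf x0 axis pick))
             (if pvAxisOf x0 axis pick then pick.2.1 else pick.1))
        (segment ++ [pick]) (rest.filter (fun g => !(g == pick)))
termination_by rest.length
decreasing_by
  have hlt : (List.filter (fun (x : {x // x ∈ rest}) => !(↑x == pick))
      rest.attach).length < rest.attach.length :=
    List.length_filter_lt_length_iff_exists.mpr
      ⟨⟨pick, List.mem_of_find?_eq_some h⟩, List.mem_attach _ _, by simp⟩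
  simpa using hlt

def build_segment_py_alt (group : List (Int × Int × Int)) : (List (Int × Int × Int)) × (List (Int × Int × Int)) :=
  match PySem.List.pop? group (-1) with
  | none => ([], [])  -- group.pop() raises IndexError on []
  | some (seed, rest) => pvLoopB seed.1 seed.2.1 seed.2.2 none seed.1 seed.1 [seed] rest

-- ===== PRECONDITION & SPEC =====
-- Pre_ excludes the empty list, on which A's group.pop() raises IndexError, and groups
-- whose last (popped) point occurs more than once: which leftover copies of it land in
-- the returned remainder is an accident of A's segment-membership filter on such
-- duplicate input, and either remainder is defensible for a group of points.
def Pre_build_segment_py (group : List (Int × Int × Int)) : Prop :=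
  group ≠ [] ∧ group.count (group.getLastD (0, 0, 0)) = 1
instance (group : List (Int × Int × Int)) : Decidable (Pre_build_segment_py group) := by unfold Pre_build_segment_py; infer_instance

def pvWitness_build_segment_py : (List (Int × Int × Int)) := [(0, 0, 0), (0, 1, 0)]

def Spec_build_segment_py (group : List (Int × Int × Int)) (out : (List (Int × Int × Int)) × (List (Int × Int × Int))) : Prop := out = build_segment_py_alt group
instance (group : List (Int × Int × Int)) (out : (List (Int × Int × Int)) × (List (Int × Int × Int))) : Decidable (Spec_build_segment_py group out) := by unfold Spec_build_segment_py; infer_instance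

-- ===== CLAIM (what is proved, stated in full; the proofs are below) =====
def Claim_equal_build_segment_py : Prop := ∀ (group : List (Int × Int × Int)), Dom_build_segment_py group → Pre_build_segment_py group → Spec_build_segment_py group (build_segment_py group)

-- ===== LEMMAS AND PROOFS =====

def pvPt (x0 y0 d0 : Int) (a : Bool) (v : Int) : Int × Int × Int :=
  if a then (x0, v, d0) else (v, y0, d0)

theorem pvFind?_congr {α : Type} (l : List α) (p q : α → Bool)
    (h : ∀ x ∈ l, p x = q x) : l.find? p = l.find? q := by
  induction l with
  | nil => rfl
  | cons x t ih =>
      simp only [List.find?_cons]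
      rw [h x (by simp)]
      cases q x
      · exact ih (fun y hy => h y (by simp [hy]))
      · rfl

theorem pvSetEq_singleton {α : Type} [BEq α] [LawfulBEq α] (c : α) (l : List α) :
    PySem.Set.equal (PySem.Set.ofList [c]) (PySem.Set.ofList l) = true ↔ (c ∈ l ∧ ∀ x ∈ l, x = c) := by
  rw [PySem.Set.equal_iff]
  simp only [PySem.Set.mem_ofList, List.mem_singleton]
  constructor
  · intro h; exact ⟨(h c).1 rfl, fun x hx => (h x).2 hx⟩
  · rintro ⟨h1, h2⟩ x
    exact ⟨fun hxc => hxc ▸ h1, fun hx => h2 x hx⟩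

theorem pvMatches_iff (p : Int × Int × Int) (seg : List (Int × Int × Int)) :
    pvMatches p seg = true ↔
      (∃ q ∈ seg, |p.1 - q.1| + |p.2.1 - q.2.1| = 1) ∧
      (((p.1 ∈ seg.map (fun q => q.1) ∧ ∀ x ∈ seg.map (fun q => q.1), x = p.1) ∨
        (p.2.1 ∈ seg.map (fun q => q.2.1) ∧ ∀ x ∈ seg.map (fun q => q.2.1), x = p.2.1)) ∧
       (p.2.2 ∈ seg.map (fun q => q.2.2) ∧ ∀ x ∈ seg.map (fun q => q.2.2), x = p.2.2)) := by
  unfold pvMatches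
  split_ifs with h1 h2 h3
  · simp only [pvIsAdj, decide_eq_true_eq, Bool.not_eq_true',
      List.any_eq_false, Bool.and_eq_true, pvSetEq_singleton] at h1 ⊢
    simp only [false_iff]
    rintro ⟨⟨q, hq, hadj⟩, -⟩
    exact h1 q hq hadj
  · simp only [pvIsAdj, decide_eq_true_eq, Bool.not_eq_true',
      List.any_eq_false, Bool.and_eq_true, pvSetEq_singleton] at h1 h2 ⊢
    simp only [true_iff]
    push_neg at h1
    obtain ⟨q, hq, hadj⟩ := h1
    exact ⟨⟨q, hq, hadj⟩, Or.inl h2.1, h2.2⟩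
  · simp only [pvIsAdj, decide_eq_true_eq, Bool.not_eq_true',
      List.any_eq_false, Bool.and_eq_true, pvSetEq_singleton] at h1 h3 ⊢
    simp only [true_iff]
    push_neg at h1
    obtain ⟨q, hq, hadj⟩ := h1
    exact ⟨⟨q, hq, hadj⟩, Or.inr h3.1, h3.2⟩
  · simp only [pvIsAdj, decide_eq_true_eq, Bool.not_eq_true',
      List.any_eq_false, Bool.and_eq_true, pvSetEq_singleton] at h2 h3 ⊢
    simp only [false_iff]
    rintro ⟨-, hXY, hD⟩
    rcases hXY with hX | hY
    · exact h2 ⟨hX, hD⟩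
    · exact h3 ⟨hY, hD⟩

set_option maxHeartbeats 1000000 in
set_option maxRecDepth 4096 in
theorem pvMatches_singleton (x0 y0 d0 : Int) (p : Int × Int × Int) :
    pvMatches p [(x0, y0, d0)] =
      decide (p ∈ [(x0 - 1, y0, d0), (x0 + 1, y0, d0), (x0, y0 - 1, d0), (x0, y0 + 1, d0)]) := by
  rw [Bool.eq_iff_iff, pvMatches_iff]
  rcases p with ⟨px, py, pd⟩
  simp [Int.abs_eq_natAbs, Prod.ext_iff, -Nat.cast_natAbs]
  omega

set_option maxHeartbeats 1000000 in
theorem pvMatches_char_true (x0 y0 d0 lo hi : Int)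
    (seg : List (Int × Int × Int)) (hlh : lo < hi)
    (hmem : ∀ q, q ∈ seg ↔ ∃ v, lo ≤ v ∧ v ≤ hi ∧ q = (x0, v, d0))
    (p : Int × Int × Int) :
    pvMatches p seg = true ↔ ∃ v, lo - 1 ≤ v ∧ v ≤ hi + 1 ∧ p = (x0, v, d0) := by
  rcases p with ⟨px, py, pd⟩
  rw [pvMatches_iff]
  constructor
  · rintro ⟨⟨q, hq, hadj⟩, hcol, hdmem, hdall⟩
    obtain ⟨vq, hv1, hv2, rfl⟩ := (hmem q).1 hq
    obtain ⟨qd, hqd, hqdeq⟩ := List.mem_map.1 hdmem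
    obtain ⟨vd, -, -, rfl⟩ := (hmem qd).1 hqd
    simp only at hqdeq hadj
    rcases hcol with ⟨hxmem, -⟩ | ⟨-, hyall⟩
    · obtain ⟨qx, hqx, hqxeq⟩ := List.mem_map.1 hxmem
      obtain ⟨vx, -, -, rfl⟩ := (hmem qx).1 hqx
      simp only at hqxeq
      refine ⟨py, ?_, ?_, ?_⟩
      · simp only [Int.abs_eq_natAbs] at hadj; omega
      · simp only [Int.abs_eq_natAbs] at hadj; omega
      · obtain rfl := hqxeq
        obtain rfl := hqdeq
        rfl
    · have hlo : lo ∈ seg.map (fun q => q.2.1) :=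
        List.mem_map.2 ⟨(x0, lo, d0), (hmem _).2 ⟨lo, le_refl _, hlh.le, rfl⟩, rfl⟩
      have hhi : hi ∈ seg.map (fun q => q.2.1) :=
        List.mem_map.2 ⟨(x0, hi, d0), (hmem _).2 ⟨hi, hlh.le, le_refl _, rfl⟩, rfl⟩
      have h1 := hyall lo hlo
      have h2 := hyall hi hhi
      simp only at h1 h2
      omega
  · rintro ⟨v, h1, h2, heq⟩
    simp only [Prod.mk.injEq] at heq
    obtain ⟨rfl, rfl, rfl⟩ := heq
    refine ⟨⟨(px, if py ≤ lo then py + 1 else py - 1, pd),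
        (hmem _).2 ⟨if py ≤ lo then py + 1 else py - 1, by omega, by omega, rfl⟩, ?_⟩,
        Or.inl ⟨?_, ?_⟩, ?_, ?_⟩
    · simp only [Int.abs_eq_natAbs]
      simp only [sub_self, Int.natAbs_zero]
      omega
    · exact List.mem_map.2 ⟨(px, lo, pd), (hmem _).2 ⟨lo, le_refl _, hlh.le, rfl⟩, rfl⟩
    · intro x hx
      obtain ⟨q, hq, rfl⟩ := List.mem_map.1 hx
      obtain ⟨w, -, -, rfl⟩ := (hmem q).1 hq
      rfl
    · exact List.mem_map.2 ⟨(px, lo, pd), (hmem _).2 ⟨lo, le_refl _, hlh.le, rfl⟩, rfl⟩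
    · intro x hx
      obtain ⟨q, hq, rfl⟩ := List.mem_map.1 hx
      obtain ⟨w, -, -, rfl⟩ := (hmem q).1 hq
      rfl

set_option maxHeartbeats 1000000 in
theorem pvMatches_char_false (x0 y0 d0 lo hi : Int)
    (seg : List (Int × Int × Int)) (hlh : lo < hi)
    (hmem : ∀ q, q ∈ seg ↔ ∃ v, lo ≤ v ∧ v ≤ hi ∧ q = (v, y0, d0))
    (p : Int × Int × Int) :
    pvMatches p seg = true ↔ ∃ v, lo - 1 ≤ v ∧ v ≤ hi + 1 ∧ p = (v, y0, d0) := by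
  rcases p with ⟨px, py, pd⟩
  rw [pvMatches_iff]
  constructor
  · rintro ⟨⟨q, hq, hadj⟩, hcol, hdmem, hdall⟩
    obtain ⟨vq, hv1, hv2, rfl⟩ := (hmem q).1 hq
    obtain ⟨qd, hqd, hqdeq⟩ := List.mem_map.1 hdmem
    obtain ⟨vd, -, -, rfl⟩ := (hmem qd).1 hqd
    simp only at hqdeq hadj
    rcases hcol with ⟨-, hxall⟩ | ⟨hymem, -⟩
    · have hlo : lo ∈ seg.map (fun q => q.1) :=
        List.mem_map.2 ⟨(lo, y0, d0), (hmem _).2 ⟨lo, le_refl _, hlh.le, rfl⟩, rfl⟩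
      have hhi : hi ∈ seg.map (fun q => q.1) :=
        List.mem_map.2 ⟨(hi, y0, d0), (hmem _).2 ⟨hi, hlh.le, le_refl _, rfl⟩, rfl⟩
      have h1 := hxall lo hlo
      have h2 := hxall hi hhi
      simp only at h1 h2
      omega
    · obtain ⟨qy, hqy, hqyeq⟩ := List.mem_map.1 hymem
      obtain ⟨vy, -, -, rfl⟩ := (hmem qy).1 hqy
      simp only at hqyeq
      refine ⟨px, ?_, ?_, ?_⟩
      · simp only [Int.abs_eq_natAbs] at hadj; omega
      · simp only [Int.abs_eq_natAbs] at hadj; omega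
      · obtain rfl := hqyeq
        obtain rfl := hqdeq
        rfl
  · rintro ⟨v, h1, h2, heq⟩
    simp only [Prod.mk.injEq] at heq
    obtain ⟨rfl, rfl, rfl⟩ := heq
    refine ⟨⟨(if px ≤ lo then px + 1 else px - 1, py, pd),
        (hmem _).2 ⟨if px ≤ lo then px + 1 else px - 1, by omega, by omega, rfl⟩, ?_⟩,
        Or.inr ⟨?_, ?_⟩, ?_, ?_⟩
    · simp only [Int.abs_eq_natAbs]
      simp only [sub_self, Int.natAbs_zero]
      omega
    · exact List.mem_map.2 ⟨(lo, py, pd), (hmem _).2 ⟨lo, le_refl _, hlh.le, rfl⟩, rfl⟩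
    · intro x hx
      obtain ⟨q, hq, rfl⟩ := List.mem_map.1 hx
      obtain ⟨w, -, -, rfl⟩ := (hmem q).1 hq
      rfl
    · exact List.mem_map.2 ⟨(lo, py, pd), (hmem _).2 ⟨lo, le_refl _, hlh.le, rfl⟩, rfl⟩
    · intro x hx
      obtain ⟨q, hq, rfl⟩ := List.mem_map.1 hx
      obtain ⟨w, -, -, rfl⟩ := (hmem q).1 hq
      rfl

set_option maxHeartbeats 1000000 in
theorem pvLoop_eq (n : Nat) :
    ∀ (x0 y0 d0 : Int) (a : Bool) (lo hi : Int) (seg rest : List (Int × Int × Int)),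
    rest.length ≤ n → lo < hi →
    (∀ q, q ∈ seg ↔ ∃ v, lo ≤ v ∧ v ≤ hi ∧ q = pvPt x0 y0 d0 a v) →
    (∀ g ∈ rest, g ∉ seg) →
    pvLoopA seg rest = pvLoopB x0 y0 d0 (some a) lo hi seg rest := by
  induction n with
  | zero =>
    intro x0 y0 d0 a lo hi seg rest hn hlh hmem hrest
    have hB : rest = [] := List.eq_nil_of_length_eq_zero (Nat.le_zero.mp hn)
    subst hB
    rw [pvLoopA, pvLoopB]
    simp [List.find?_nil]
  | succ n ih =>
    intro x0 y0 d0 a lo hi seg rest hn hlh hmem hrest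
    have hchar : ∀ p, pvMatches p seg = true ↔
        ∃ v, lo - 1 ≤ v ∧ v ≤ hi + 1 ∧ p = pvPt x0 y0 d0 a v := by
      cases a
      · exact pvMatches_char_false x0 y0 d0 lo hi seg hlh (by simpa [pvPt] using hmem)
      · exact pvMatches_char_true x0 y0 d0 lo hi seg hlh (by simpa [pvPt] using hmem)
    have hcands : pvCands x0 y0 d0 (some a) lo hi =
        [pvPt x0 y0 d0 a (lo - 1), pvPt x0 y0 d0 a (hi + 1)] := by
      cases a <;> rfl
    have hfind : rest.find? (fun point => pvMatches point seg)
        = rest.find? (fun p => decide (p ∈ pvCands x0 y0 d0 (some a) lo hi)) := by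
      apply pvFind?_congr
      intro g hg
      rw [hcands, Bool.eq_iff_iff, hchar, decide_eq_true_eq]
      constructor
      · rintro ⟨v, hv1, hv2, rfl⟩
        by_cases hv : lo ≤ v ∧ v ≤ hi
        · exact absurd ((hmem _).2 ⟨v, hv.1, hv.2, rfl⟩) (hrest _ hg)
        · have : v = lo - 1 ∨ v = hi + 1 := by omega
          rcases this with rfl | rfl
          · simp
          · simp
      · intro hmem2
        simp only [List.mem_cons, List.not_mem_nil, or_false] at hmem2
        rcases hmem2 with rfl | rfl
        · exact ⟨lo - 1, by omega, by omega, rfl⟩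
        · exact ⟨hi + 1, by omega, by omega, rfl⟩
    cases hB : rest.find? (fun p => decide (p ∈ pvCands x0 y0 d0 (some a) lo hi)) with
    | none =>
      rw [pvLoopA, hfind.trans hB, pvLoopB, hB]
    | some p =>
      have hpBrest := List.mem_of_find?_eq_some hB
      have hpcand : p ∈ [pvPt x0 y0 d0 a (lo - 1), pvPt x0 y0 d0 a (hi + 1)] := by
        have := List.find?_some hB
        rw [hcands] at this
        simpa using this
      obtain ⟨w, hwor, rfl⟩ : ∃ w, (w = lo - 1 ∨ w = hi + 1) ∧ p = pvPt x0 y0 d0 a w := by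
        rcases (by simpa using hpcand : p = pvPt x0 y0 d0 a (lo - 1) ∨ p = pvPt x0 y0 d0 a (hi + 1)) with rfl | rfl
        · exact ⟨lo - 1, Or.inl rfl, rfl⟩
        · exact ⟨hi + 1, Or.inr rfl, rfl⟩
      rw [pvLoopA, hfind.trans hB, pvLoopB, hB]
      have ha : pvAxisOf x0 (some a) (pvPt x0 y0 d0 a w) = a := rfl
      simp only [ha, pvBase]
      have hv : (if a = true then (pvPt x0 y0 d0 a w).2.1 else (pvPt x0 y0 d0 a w).1) = w := by
        cases a <;> rfl
      rw [hv]
      have hfilters : rest.filter (fun g => !decide (g ∈ seg ++ [pvPt x0 y0 d0 a w]))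
          = rest.filter (fun g => !(g == pvPt x0 y0 d0 a w)) := by
        apply List.filter_congr
        intro g hg
        have hgs : g ∉ seg := hrest g hg
        by_cases hgp : g = pvPt x0 y0 d0 a w <;> simp [List.mem_append, hgs, hgp]
      rw [hfilters]
      have hlen' : (rest.filter (fun g => !(g == pvPt x0 y0 d0 a w))).length ≤ n := by
        have hlt : (rest.filter (fun g => !(g == pvPt x0 y0 d0 a w))).length < rest.length :=
          List.length_filter_lt_length_iff_exists.mpr ⟨_, hpBrest, by simp⟩
        omega
      have hmem' : ∀ q, q ∈ seg ++ [pvPt x0 y0 d0 a w] ↔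
          ∃ v, min lo w ≤ v ∧ v ≤ max hi w ∧ q = pvPt x0 y0 d0 a v := by
        intro q
        rw [List.mem_append, List.mem_singleton, hmem q]
        constructor
        · rintro (⟨v, h1, h2, rfl⟩ | rfl)
          · exact ⟨v, by omega, by omega, rfl⟩
          · exact ⟨w, by omega, by omega, rfl⟩
        · rintro ⟨v, h1, h2, rfl⟩
          by_cases hv2 : lo ≤ v ∧ v ≤ hi
          · exact Or.inl ⟨v, hv2.1, hv2.2, rfl⟩
          · have hvw : v = w := by omega
            subst hvw
            exact Or.inr rfl
      have hrest' : ∀ g ∈ rest.filter (fun g => !(g == pvPt x0 y0 d0 a w)),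
          g ∉ seg ++ [pvPt x0 y0 d0 a w] := by
        intro g hg hgm
        have hg2 := List.mem_filter.1 hg
        rcases List.mem_append.1 hgm with hgseg | hgp
        · exact hrest g hg2.1 hgseg
        · exact absurd (List.mem_singleton.1 hgp) (by simpa using hg2.2)
      exact ih x0 y0 d0 a (min lo w) (max hi w) (seg ++ [pvPt x0 y0 d0 a w])
        (rest.filter (fun g => !(g == pvPt x0 y0 d0 a w))) hlen' (by omega) hmem' hrest'

set_option maxHeartbeats 1000000 in
theorem pvBuild_eq (xs : List (Int × Int × Int)) (x0 y0 d0 : Int)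
    (hseed : (x0, y0, d0) ∉ xs) :
    build_segment_py (xs ++ [(x0, y0, d0)]) = build_segment_py_alt (xs ++ [(x0, y0, d0)]) := by
  unfold build_segment_py build_segment_py_alt
  rw [PySem.List.pop?_last]
  dsimp only
  have hfind1 : xs.find? (fun point => pvMatches point [(x0, y0, d0)])
      = xs.find? (fun p => decide (p ∈ pvCands x0 y0 d0 none x0 x0)) := by
    apply pvFind?_congr
    intro g hg
    rw [pvMatches_singleton]
    rfl
  cases hF : xs.find? (fun p => decide (p ∈ pvCands x0 y0 d0 none x0 x0)) with
  | none =>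
    rw [pvLoopA, hfind1.trans hF, pvLoopB, hF]
  | some p =>
    obtain ⟨aB, w, hw, rfl⟩ : ∃ aB w,
        (w = (if aB then y0 else x0) - 1 ∨ w = (if aB then y0 else x0) + 1) ∧
        p = pvPt x0 y0 d0 aB w := by
      have hp4 := List.find?_some hF
      simp only [pvCands, List.mem_cons, List.not_mem_nil, or_false, decide_eq_true_eq] at hp4
      rcases hp4 with rfl | rfl | rfl | rfl
      · exact ⟨false, x0 - 1, by simp, rfl⟩
      · exact ⟨false, x0 + 1, by simp, rfl⟩
      · exact ⟨true, y0 - 1, by simp, rfl⟩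
      · exact ⟨true, y0 + 1, by simp, rfl⟩
    have haxis : pvAxisOf x0 none (pvPt x0 y0 d0 aB w) = aB := by
      cases aB
      · have hne : w ≠ x0 := by simp only [Bool.false_eq_true, if_false] at hw; omega
        simp [pvAxisOf, pvPt, hne]
      · simp [pvAxisOf, pvPt]
    rw [pvLoopA, hfind1.trans hF, pvLoopB, hF]
    simp only [haxis, pvBase]
    have hv : (if aB = true then (pvPt x0 y0 d0 aB w).2.1 else (pvPt x0 y0 d0 aB w).1) = w := by
      cases aB <;> rfl
    rw [hv]
    obtain ⟨s0, hs0⟩ : ∃ s0, (if aB then y0 else x0) = s0 := ⟨_, rfl⟩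
    rw [hs0] at hw
    have hseedpt : pvPt x0 y0 d0 aB s0 = (x0, y0, d0) := by
      rw [← hs0]; cases aB <;> simp [pvPt]
    have hfilters : xs.filter (fun g => !decide (g ∈ [(x0, y0, d0)] ++ [pvPt x0 y0 d0 aB w]))
        = xs.filter (fun g => !(g == pvPt x0 y0 d0 aB w)) := by
      apply List.filter_congr
      intro g hg
      have hgs : g ≠ (x0, y0, d0) := fun h => hseed (h ▸ hg)
      by_cases hgp : g = pvPt x0 y0 d0 aB w <;> simp [List.mem_append, hgs, hgp]
    rw [hs0, hfilters]
    have hmem0 : ∀ q, q ∈ ([(x0, y0, d0)] ++ [pvPt x0 y0 d0 aB w] : List (Int × Int × Int)) ↔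
        ∃ v, min s0 w ≤ v ∧ v ≤ max s0 w ∧ q = pvPt x0 y0 d0 aB v := by
      intro q
      simp only [List.mem_append, List.mem_singleton]
      constructor
      · rintro (rfl | rfl)
        · exact ⟨s0, by omega, by omega, hseedpt.symm⟩
        · exact ⟨w, by omega, by omega, rfl⟩
      · rintro ⟨v, h1, h2, rfl⟩
        have hvs : v = s0 ∨ v = w := by omega
        rcases hvs with rfl | rfl
        · exact Or.inl hseedpt
        · exact Or.inr rfl
    have hrest0 : ∀ g ∈ xs.filter (fun g => !(g == pvPt x0 y0 d0 aB w)),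
        g ∉ ([(x0, y0, d0)] ++ [pvPt x0 y0 d0 aB w] : List (Int × Int × Int)) := by
      intro g hg hgm
      have hg2 := List.mem_filter.1 hg
      rcases List.mem_append.1 hgm with h | h
      · exact hseed (List.mem_singleton.1 h ▸ hg2.1)
      · exact absurd (List.mem_singleton.1 h) (by simpa using hg2.2)
    exact pvLoop_eq (xs.filter (fun g => !(g == pvPt x0 y0 d0 aB w))).length
      x0 y0 d0 aB (min s0 w) (max s0 w) ([(x0, y0, d0)] ++ [pvPt x0 y0 d0 aB w])
      (xs.filter (fun g => !(g == pvPt x0 y0 d0 aB w))) le_rfl (by omega) hmem0 hrest0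

-- ===== VERDICT (by name: the statement is the Claim_ definition above) =====
theorem build_segment_py_spec : Claim_equal_build_segment_py := by
  intro group hdom hpre
  unfold Spec_build_segment_py
  obtain ⟨hne, hcount⟩ := hpre
  obtain ⟨xs, p, rfl⟩ : ∃ xs p, group = xs ++ [p] :=
    ⟨group.dropLast, group.getLast hne, (List.dropLast_append_getLast hne).symm⟩
  have hlast : (xs ++ [p]).getLastD (0, 0, 0) = p := by
    simp [List.getLastD_eq_getLast?]
  rw [hlast] at hcount
  have hnot : p ∉ xs := by
    intro hmem
    have h2 : 2 ≤ (xs ++ [p]).count p := by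
      rw [List.count_append]
      have h1 : 1 ≤ xs.count p := List.one_le_count_iff.2 hmem
      simp only [List.count_singleton, beq_self_eq_true, if_true]
      omega
    omega
  obtain ⟨x0, y0, d0⟩ := p
  exact pvBuild_eq xs x0 y0 d0 hnot
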